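-- pv_equiv track=rewrite | github.com/jaidevjoshi83/r2g2 | r_script/RScriptSupport.py | clean_r_script
-- ===== SOURCE A (Python) =====
-- def clean_r_script(lines):
--     new_lines = []
--
--     for i, line in enumerate(lines):
--         if "parse_args()" in line :
--             new_lines.append(line)
--             break
--         elif "library"  in line:
--             pass
--         else:
--             new_lines.append(line)
--
--     new_lines.insert(1, 'library(argparse)')
--     new_string = '\n'.join(new_lines)
--     return new_string
-- ===== SOURCE B (Python) =====
-- def clean_r_script(lines):
--     end = next((i for i, l in enumerate(lines) if "parse_args()" in l), None)
--     if end is None: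
--         kept = [l for l in lines if "library" not in l]
--     else:
--         kept = [l for l in lines[:end] if "library" not in l] + [lines[end]]
--     kept.insert(1, 'library(argparse)')
--     return '\n'.join(kept)
-- ===== Notes on version B (the rewrite author's own statement) =====
-- stated objective: alternative
-- what changed: Replaces A's single loop with break-and-skip by a two-phase decomposition: first find the index of the parse_args() line, then build the kept list as a slice filter plus that line (or a whole-list filter if absent).
import Mathlib
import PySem

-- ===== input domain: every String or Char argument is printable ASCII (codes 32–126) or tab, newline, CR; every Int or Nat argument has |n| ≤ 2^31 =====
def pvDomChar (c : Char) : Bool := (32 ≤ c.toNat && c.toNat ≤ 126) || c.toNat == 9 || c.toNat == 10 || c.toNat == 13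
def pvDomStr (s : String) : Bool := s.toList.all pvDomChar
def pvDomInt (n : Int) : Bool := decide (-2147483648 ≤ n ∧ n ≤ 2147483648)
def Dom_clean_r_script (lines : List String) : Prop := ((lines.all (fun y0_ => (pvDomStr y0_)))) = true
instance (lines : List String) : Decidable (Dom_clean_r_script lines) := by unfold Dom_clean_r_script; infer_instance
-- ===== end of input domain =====

-- B replaces A's loop-with-break by a find-cutoff-index + slice-filter decomposition (alternative, same cost).

-- ===== PORT A =====
-- A's for-loop with break, accumulating new_lines
def cleanLoopA (lines : List String) (acc : List String) : List String :=
  match lines with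
  | [] => acc
  | l :: rest =>
    if PySem.Str.isIn "parse_args()" l then acc ++ [l]
    else if PySem.Str.isIn "library" l then cleanLoopA rest acc
    else cleanLoopA rest (acc ++ [l])

def clean_r_script (lines : List String) : String :=
  PySem.Str.join "\n" (PySem.List.insert (cleanLoopA lines []) 1 "library(argparse)")

-- ===== PORT B =====
def clean_r_script_alt (lines : List String) : String :=
  let kept : List String :=
    match List.findIdx? (fun l => PySem.Str.isIn "parse_args()" l) lines with
    | none => lines.filter (fun l => !PySem.Str.isIn "library" l)
    | some i => (lines.take i).filter (fun l => !PySem.Str.isIn "library" l) ++ [lines.getD i ""]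
      -- lines.getD i "" is Python's lines[end]: i comes from findIdx?, so it is always in range
  PySem.Str.join "\n" (PySem.List.insert kept 1 "library(argparse)")

-- ===== PRECONDITION & SPEC =====
def Spec_clean_r_script (lines : List String) (out : String) : Prop := out = clean_r_script_alt lines
instance (lines : List String) (out : String) : Decidable (Spec_clean_r_script lines out) := by unfold Spec_clean_r_script; infer_instance

-- ===== CLAIM (what is proved, stated in full; the proofs are below) =====
def Claim_equal_clean_r_script : Prop := ∀ (lines : List String), Dom_clean_r_script lines → Spec_clean_r_script lines (clean_r_script lines)

-- ===== LEMMAS AND PROOFS =====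

def keptB (lines : List String) : List String :=
  match List.findIdx? (fun l => PySem.Str.isIn "parse_args()" l) lines with
  | none => lines.filter (fun l => !PySem.Str.isIn "library" l)
  | some i => (lines.take i).filter (fun l => !PySem.Str.isIn "library" l) ++ [lines.getD i ""]

theorem cleanLoopA_eq_keptB (lines : List String) (acc : List String) :
    cleanLoopA lines acc = acc ++ keptB lines := by
  induction lines generalizing acc with
  | nil => simp [cleanLoopA, keptB]
  | cons l rest ih =>
    by_cases hp : PySem.Str.isIn "parse_args()" l = true
    · simp only [cleanLoopA, keptB, List.findIdx?_cons, hp, if_true, List.take_zero,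
        List.filter_nil, List.nil_append, List.getD_cons_zero]
    · rw [Bool.not_eq_true] at hp
      by_cases hl : PySem.Str.isIn "library" l = true
      · simp only [cleanLoopA, hp, Bool.false_eq_true, if_false, hl, if_true]
        rw [ih]
        congr 1
        simp only [keptB, List.findIdx?_cons, hp, Bool.false_eq_true, if_false]
        cases h : List.findIdx? (fun l => PySem.Str.isIn "parse_args()" l) rest with
        | none =>
          simp only [Option.map_none, List.filter_cons, hl, Bool.not_true, Bool.false_eq_true,
            if_false]
        | some i =>
          simp only [Option.map_some, List.take_succ_cons, List.filter_cons, hl, Bool.not_true,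
            Bool.false_eq_true, if_false, List.getD_cons_succ]
      · rw [Bool.not_eq_true] at hl
        simp only [cleanLoopA, hp, hl, Bool.false_eq_true, if_false]
        rw [ih, List.append_assoc]
        congr 1
        simp only [keptB, List.findIdx?_cons, hp, Bool.false_eq_true, if_false]
        cases h : List.findIdx? (fun l => PySem.Str.isIn "parse_args()" l) rest with
        | none =>
          simp only [Option.map_none, List.filter_cons, hl, Bool.not_false, if_true,
            List.singleton_append]
        | some i =>
          simp only [Option.map_some, List.take_succ_cons, List.filter_cons, hl, Bool.not_false,
            if_true, List.getD_cons_succ, List.nil_append, List.cons_append]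

-- ===== VERDICT (by name: the statement is the Claim_ definition above) =====
theorem clean_r_script_spec : Claim_equal_clean_r_script := by
  intro lines _
  show clean_r_script lines = clean_r_script_alt lines
  rw [clean_r_script, clean_r_script_alt, cleanLoopA_eq_keptB, List.nil_append, keptB]
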